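-- pv_equiv track=rewrite | github.com/maxcohen31/Codewars-Solutions | Codewars/Stanton_measure_7_kyu.py | stanton_measure
-- ===== SOURCE A (Python) =====
-- def stanton_measure(arr):
--     count_one = 0
--     stanton = 0
--     for a in arr:
--         if a == 1:
--             count_one += 1
--     for i in arr:
--         if i == count_one:
--             stanton += 1
--     return stanton
-- ===== SOURCE B (Python) =====
-- def _run_len(s, v):
--     # length of the run of v in a sorted list: skip to the run, then walk it
--     i = 0
--     n = len(s)
--     while i < n and s[i] != v:
--         i += 1
--     j = i
--     while j < n and s[j] == v:
--         j += 1
--     return j - i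
--
-- def stanton_measure(arr):
--     s = sorted(arr)
--     k = _run_len(s, 1)
--     return _run_len(s, k)
-- ===== Notes on version B (the rewrite author's own statement) =====
-- stated objective: alternative
-- what changed: Sorts the array once so equal elements become contiguous, then answers by locating and measuring runs (skip to the run of 1s, measure it, then skip to and measure the run of that length) instead of scanning the whole array with an equality counter twice.
import Mathlib
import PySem

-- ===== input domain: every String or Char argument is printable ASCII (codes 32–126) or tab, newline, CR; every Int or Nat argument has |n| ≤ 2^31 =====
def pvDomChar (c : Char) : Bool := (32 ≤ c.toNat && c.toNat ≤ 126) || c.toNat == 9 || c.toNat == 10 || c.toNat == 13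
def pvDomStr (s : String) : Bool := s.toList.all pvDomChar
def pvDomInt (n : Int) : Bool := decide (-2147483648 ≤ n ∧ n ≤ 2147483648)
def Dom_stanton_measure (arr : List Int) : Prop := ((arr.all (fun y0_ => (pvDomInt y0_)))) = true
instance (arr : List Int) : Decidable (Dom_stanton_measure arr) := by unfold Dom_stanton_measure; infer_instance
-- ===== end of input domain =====

-- B sorts the array once and answers by locating and measuring runs of equal elements, instead of A's two whole-array equality-counting scans (alternative algorithm).

-- ===== PORT A =====
def stanton_measure (arr : List Int) : Int :=
  let count_one := arr.foldl (fun c a => if a == 1 then c + 1 else c) (0 : Int)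
  let stanton := arr.foldl (fun s i => if i == count_one then s + 1 else s) (0 : Int)
  stanton

-- ===== PORT B =====
-- first while loop of _run_len: advance past elements ≠ v
def skipNe (v : Int) : List Int → List Int
  | [] => []
  | x :: xs => if x ≠ v then skipNe v xs else x :: xs

-- second while loop of _run_len: count while elements == v (j - i)
def runLenEq (v : Int) : List Int → Int
  | [] => 0
  | x :: xs => if x == v then 1 + runLenEq v xs else 0

def run_len (s : List Int) (v : Int) : Int := runLenEq v (skipNe v s)

def stanton_measure_alt (arr : List Int) : Int :=
  let s := PySem.List.sorted arr (fun x => x) false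
  let k := run_len s 1
  run_len s k

-- ===== PRECONDITION & SPEC =====
def Spec_stanton_measure (arr : List Int) (out : Int) : Prop := out = stanton_measure_alt arr
instance (arr : List Int) (out : Int) : Decidable (Spec_stanton_measure arr out) := by unfold Spec_stanton_measure; infer_instance

-- ===== CLAIM (what is proved, stated in full; the proofs are below) =====
def Claim_equal_stanton_measure : Prop := ∀ (arr : List Int), Dom_stanton_measure arr → Spec_stanton_measure arr (stanton_measure arr)

-- ===== LEMMAS AND PROOFS =====
theorem foldl_if_eq_count (v : Int) (arr : List Int) (c : Int) :
    arr.foldl (fun s i => if i == v then s + 1 else s) c = c + (arr.count v : Int) := by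
  induction arr generalizing c with
  | nil => simp [List.count]
  | cons x xs ih =>
    simp only [List.foldl_cons, List.count_cons, ih]
    by_cases h : x = v
    · simp [h]; omega
    · simp [h, beq_iff_eq]

-- on a list whose elements are all ≥ v and sorted, the leading run of v is all of its occurrences
theorem runLenEq_eq_count (v : Int) (l : List Int)
    (hs : l.Pairwise (· ≤ ·)) (hge : ∀ y ∈ l, v ≤ y) :
    runLenEq v l = (l.count v : Int) := by
  induction l with
  | nil => simp [runLenEq]
  | cons y ys ih =>
    rcases List.pairwise_cons.1 hs with ⟨hy, hys⟩
    by_cases h : y = v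
    · subst h
      have : runLenEq y (y :: ys) = 1 + runLenEq y ys := by simp [runLenEq]
      rw [this, ih hys (fun z hz => hy z hz)]
      simp; omega
    · have hlt : v < y := lt_of_le_of_ne (hge y (List.mem_cons_self)) (fun e => h e.symm)
      have h0 : ys.count v = 0 := by
        rw [List.count_eq_zero]
        intro hv
        exact absurd (hy v hv) (not_le.2 hlt)
      simp [runLenEq, h, h0]

theorem run_len_eq_count (v : Int) (l : List Int) (hs : l.Pairwise (· ≤ ·)) :
    run_len l v = (l.count v : Int) := by
  induction l with
  | nil => simp [run_len, skipNe, runLenEq]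
  | cons y ys ih =>
    rcases List.pairwise_cons.1 hs with ⟨hy, hys⟩
    by_cases h : y = v
    · subst h
      have : run_len (y :: ys) y = runLenEq y (y :: ys) := by simp [run_len, skipNe]
      rw [this, runLenEq_eq_count y (y :: ys) hs (fun z hz => by
        rcases List.mem_cons.1 hz with rfl | hz
        · exact le_refl _
        · exact hy z hz)]
    · have : run_len (y :: ys) v = run_len ys v := by simp [run_len, skipNe, h]
      rw [this, ih hys]
      simp [h]

-- ===== VERDICT (by name: the statement is the Claim_ definition above) =====
theorem stanton_measure_spec : Claim_equal_stanton_measure := by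
  intro arr _
  show stanton_measure arr = stanton_measure_alt arr
  rw [stanton_measure, stanton_measure_alt]
  have hperm := PySem.List.sorted_perm arr (fun x => x) false
  have hpw : (PySem.List.sorted arr (fun x => x) false).Pairwise (· ≤ ·) :=
    PySem.List.sorted_pairwise arr (fun x => x)
  simp only [foldl_if_eq_count, run_len_eq_count _ _ hpw, hperm.count_eq]
  simp
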